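-- pv_equiv track=rewrite | github.com/TGCollins/Codewars-Python | 7 kyu/Help Suzuki complete his chores!.py | chore_assignment
-- ===== SOURCE A (Python) =====
-- def chore_assignment(chores):
--     res = []
--     while len(chores) > 0:
--         res.append(max(chores) + min(chores))
--         chores.remove(max(chores))
--         chores.remove(min(chores))
--
--     res.sort()
--     return res
-- ===== SOURCE B (Python) =====
-- def chore_assignment(chores):
--     s = sorted(chores)
--     half = len(s) // 2
--     return sorted(lo + hi for lo, hi in zip(s[:half], reversed(s[half:])))
-- ===== Notes on version B (the rewrite author's own statement) =====
-- stated objective: faster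
-- what changed: B sorts once and pairs the sorted list outside-in (s[k]+s[n-1-k] via zip of the two halves) instead of A's repeated max/min scans with list.remove on a shrinking list; note A empties its argument list in place, B does not mutate it.
import Mathlib
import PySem

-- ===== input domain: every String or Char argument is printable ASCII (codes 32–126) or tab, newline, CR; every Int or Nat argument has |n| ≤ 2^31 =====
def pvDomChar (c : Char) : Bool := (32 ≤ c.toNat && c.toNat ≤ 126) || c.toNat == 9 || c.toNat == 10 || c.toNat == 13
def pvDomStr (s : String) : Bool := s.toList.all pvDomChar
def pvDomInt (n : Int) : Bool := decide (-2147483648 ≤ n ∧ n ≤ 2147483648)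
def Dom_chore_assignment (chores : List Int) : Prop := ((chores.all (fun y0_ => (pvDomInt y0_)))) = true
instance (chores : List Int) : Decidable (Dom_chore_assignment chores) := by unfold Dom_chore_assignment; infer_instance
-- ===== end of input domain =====

-- B replaces A's repeated max/min scans + remove by one sort and an outside-in pairing;
-- A empties its argument list in place, B does not mutate it — the equivalence proved is about the return value.

-- ===== PORT A =====
-- length of a successful remove? (used only for termination of the loop below)
theorem pvRemoveLen {xs : List Int} {v : Int} {r : List Int}
    (h : PySem.List.remove? xs v = some r) : r.length + 1 = xs.length := by
  have hv : v ∈ xs := by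
    by_contra hv
    simp [(PySem.List.remove?_eq_none_iff xs v).2 hv] at h
  rw [PySem.List.remove?_eq_some_erase xs v hv] at h
  have hlen := List.length_pos_of_mem hv
  obtain rfl : r = xs.erase v := (Option.some_inj.1 h).symm
  rw [List.length_erase_of_mem hv]
  omega

-- the while loop of A: res.append(max + min); chores.remove(max); chores.remove(min)
def choreLoopA : List Int → List Int → List Int
  | [], res => res
  | x :: t, res =>
    match PySem.List.max? (x :: t) (fun y => y), PySem.List.min? (x :: t) (fun y => y) with
    | some M, some m =>
      let res' := res ++ [M + m]
      match hr1 : PySem.List.remove? (x :: t) M with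
      | none => res'          -- unreachable: max(chores) ∈ chores
      | some l1 =>
        match hr2 : PySem.List.remove? l1 m with
        | none => res'        -- Python raises ValueError here (odd length); excluded by Pre_
        | some l2 => choreLoopA l2 res'
    | _, _ => res             -- unreachable: the list is nonempty
  termination_by l _ => l.length
  decreasing_by
    have h1 := pvRemoveLen hr1
    have h2 := pvRemoveLen hr2
    omega

def chore_assignment (chores : List Int) : List Int :=
  PySem.List.sorted (choreLoopA chores []) (fun y => y) false

-- ===== PORT B =====
def chore_assignment_alt (chores : List Int) : List Int :=
  let s := PySem.List.sorted chores (fun y => y) false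
  let half := s.length / 2
  -- sorted(lo + hi for lo, hi in zip(s[:half], reversed(s[half:])))
  PySem.List.sorted
    (List.zipWith (fun lo hi => lo + hi) (s.take half) ((s.drop half).reverse))
    (fun y => y) false

-- ===== PRECONDITION & SPEC =====
-- Pre_ excludes odd-length lists, on which A raises ValueError (min/remove on the emptied list).
def Pre_chore_assignment (chores : List Int) : Prop := chores.length % 2 = 0
instance (chores : List Int) : Decidable (Pre_chore_assignment chores) := by
  unfold Pre_chore_assignment; infer_instance
def pvWitness_chore_assignment : List Int := [3, 1, 2, 5]

def Spec_chore_assignment (chores : List Int) (out : List Int) : Prop := out = chore_assignment_alt chores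
instance (chores : List Int) (out : List Int) : Decidable (Spec_chore_assignment chores out) := by unfold Spec_chore_assignment; infer_instance

-- ===== CLAIM (what is proved, stated in full; the proofs are below) =====
def Claim_equal_chore_assignment : Prop := ∀ (chores : List Int), Dom_chore_assignment chores → Pre_chore_assignment chores → Spec_chore_assignment chores (chore_assignment chores)

-- ===== LEMMAS AND PROOFS =====

-- proof-side recursion: sum the outermost pair, recurse on the interior
def pvOuter : List Int → List Int
  | [] => []
  | [_] => []
  | a :: b :: t => (a + (b :: t).getLast (by simp)) :: pvOuter ((b :: t).dropLast)
  termination_by l => l.length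
  decreasing_by simp

theorem pvOuter_concat (d : List Int) (a b : Int) :
    pvOuter (a :: (d ++ [b])) = (a + b) :: pvOuter d := by
  cases d with
  | nil => simp [pvOuter]
  | cons e d' =>
    rw [show a :: ((e :: d') ++ [b]) = a :: e :: (d' ++ [b]) by simp, pvOuter]
    congr 1
    · congr 1
      simp
    · congr 1
      rw [show e :: (d' ++ [b]) = (e :: d') ++ [b] by simp, List.dropLast_concat]

-- dropping k < len elements keeps the last element last
theorem pvDrop_split (t : List Int) (k : Nat) (hk : k < t.length) (hne : t ≠ []) :
    t.drop k = t.dropLast.drop k ++ [t.getLast hne] := by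
  conv_lhs => rw [← List.dropLast_concat_getLast hne]
  rw [List.drop_append_of_le_length (by simp; omega)]

-- B's zip formula computes pvOuter, on every list
theorem pvZip_eq_outer_aux (n : Nat) : ∀ s : List Int, s.length ≤ n →
    List.zipWith (fun lo hi => lo + hi) (s.take (s.length / 2)) ((s.drop (s.length / 2)).reverse)
      = pvOuter s := by
  induction n with
  | zero =>
    intro s hs
    have : s = [] := List.eq_nil_of_length_eq_zero (by omega)
    subst this; simp [pvOuter]
  | succ n ih =>
    intro s hs
    match s with
    | [] => simp [pvOuter]
    | [a] => simp [pvOuter]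
    | a :: b :: u =>
      set t := b :: u with ht
      have htne : t ≠ [] := by simp [ht]
      have htl : 1 ≤ t.length := by simp [ht]
      set half := (a :: t).length / 2 with hhalf
      have h1 : 1 ≤ half := by simp [hhalf]; omega
      have h2 : half ≤ t.length := by simp [hhalf]; omega
      have htake : (a :: t).take half = a :: t.take (half - 1) := by
        rw [show half = (half - 1) + 1 by omega]; rfl
      have hdrop : (a :: t).drop half = t.drop (half - 1) := by
        rw [show half = (half - 1) + 1 by omega]; rfl
      have hksmall : half - 1 < t.length := by omega
      rw [htake, hdrop, pvDrop_split t (half - 1) hksmall htne, List.reverse_append]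
      simp only [List.reverse_cons, List.reverse_nil, List.nil_append, List.singleton_append,
        List.zipWith_cons_cons]
      have htake2 : t.take (half - 1) = t.dropLast.take (half - 1) := by
        rw [List.dropLast_eq_take, List.take_take]
        congr 1
        omega
      have hlen2 : t.dropLast.length = t.length - 1 := by simp
      have hhalf2 : t.dropLast.length / 2 = half - 1 := by
        rw [hlen2]; simp only [hhalf, List.length_cons]; omega
      have hIH := ih t.dropLast (by omega)
      rw [hhalf2] at hIH
      rw [htake2, hIH]
      -- right-hand side: pvOuter (a :: t) with t = dropLast t ++ [getLast t]
      conv_rhs => rw [show a :: t = a :: (t.dropLast ++ [t.getLast htne]) by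
        rw [List.dropLast_concat_getLast htne]]
      rw [pvOuter_concat]

theorem pvZip_eq_outer (s : List Int) :
    List.zipWith (fun lo hi => lo + hi) (s.take (s.length / 2)) ((s.drop (s.length / 2)).reverse)
      = pvOuter s :=
  pvZip_eq_outer_aux s.length s le_rfl

-- every element of a ≤-pairwise list is ≤ its last element
theorem pvLe_getLast : ∀ {s : List Int} (hne : s ≠ []), s.Pairwise (· ≤ ·) →
    ∀ x ∈ s, x ≤ s.getLast hne := by
  intro s
  induction s with
  | nil => intro hne; exact absurd rfl hne
  | cons a t ih =>
    intro hne hp x hx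
    by_cases htne : t = []
    · subst htne
      simp at hx
      simp [hx]
    · rw [List.getLast_cons htne]
      rcases List.mem_cons.1 hx with rfl | hxt
      · have hlast : t.getLast htne ∈ t := List.getLast_mem htne
        exact (List.pairwise_cons.1 hp).1 _ hlast
      · exact ih htne (List.pairwise_cons.1 hp).2 x hxt

-- one unfolding of the loop on a nonempty list where both removes succeed
theorem choreLoopA_cons {x : Int} {t : List Int} {M m : Int} {l1 l2 res : List Int}
    (hM : PySem.List.max? (x :: t) (fun y => y) = some M)
    (hm : PySem.List.min? (x :: t) (fun y => y) = some m)
    (h1 : PySem.List.remove? (x :: t) M = some l1)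
    (h2 : PySem.List.remove? l1 m = some l2) :
    choreLoopA (x :: t) res = choreLoopA l2 (res ++ [M + m]) := by
  rw [choreLoopA]
  simp only [hM, hm]
  split
  · next heq => rw [h1] at heq; exact absurd heq (by simp)
  · next l1' heq =>
    rw [h1] at heq
    obtain rfl : l1' = l1 := by injection heq with h; exact h.symm
    split
    · next heq2 => rw [h2] at heq2; exact absurd heq2 (by simp)
    · next l2' heq2 =>
      rw [h2] at heq2
      obtain rfl : l2' = l2 := by injection heq2 with h; exact h.symm
      rfl

-- the main loop invariant: on an even-length list, A's loop appends a permutation of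
-- pvOuter of the sorted list
theorem pvLoop_perm (n : Nat) : ∀ (l : List Int), l.length = n → l.length % 2 = 0 →
    ∀ res : List Int,
      (choreLoopA l res).Perm (res ++ pvOuter (PySem.List.sorted l (fun y => y) false)) := by
  induction n using Nat.strong_induction_on with
  | _ n ih =>
    intro l hn hev res
    match l with
    | [] =>
      rw [(PySem.List.sorted_eq_nil_iff ([] : List Int) (fun y => y) false).2 rfl]
      simp [choreLoopA, pvOuter]
    | x :: t =>
      -- the list is nonempty and of even length, hence length ≥ 2
      have hlen2 : 2 ≤ (x :: t).length := by
        simp only [List.length_cons] at hev ⊢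
        omega
      obtain ⟨M, hM⟩ : ∃ M, PySem.List.max? (x :: t) (fun y => y) = some M := by
        cases hMx : PySem.List.max? (x :: t) (fun y => y) with
        | none => exact absurd ((PySem.List.max?_eq_none_iff _ _).1 hMx) (by simp)
        | some M => exact ⟨M, rfl⟩
      obtain ⟨m, hm⟩ : ∃ m, PySem.List.min? (x :: t) (fun y => y) = some m := by
        cases hmx : PySem.List.min? (x :: t) (fun y => y) with
        | none => exact absurd ((PySem.List.min?_eq_none_iff _ _).1 hmx) (by simp)
        | some m => exact ⟨m, rfl⟩
      have hMmem : M ∈ (x :: t) := PySem.List.max?_mem hM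
      have hmmem : m ∈ (x :: t) := PySem.List.min?_mem hm
      have hMmax : ∀ y ∈ (x :: t), y ≤ M := PySem.List.max?_isMax hM
      have hmmin : ∀ y ∈ (x :: t), m ≤ y := PySem.List.min?_isMin hm
      have h1 : PySem.List.remove? (x :: t) M = some ((x :: t).erase M) :=
        PySem.List.remove?_eq_some_erase _ _ hMmem
      -- m is still in the list after erasing one occurrence of M
      have hm1 : m ∈ (x :: t).erase M := by
        by_cases hmM : m = M
        · subst hmM
          have hcnt : 1 ≤ List.count m ((x :: t).erase m) := by
            have hall : ∀ y ∈ (x :: t), y = m := fun y hy =>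
              le_antisymm (hMmax y hy) (hmmin y hy)
            have : List.count m (x :: t) = (x :: t).length :=
              List.count_eq_length.2 (fun y hy => by rw [hall y hy])
            rw [List.count_erase_self]
            omega
          exact List.count_pos_iff.1 (by omega)
        · exact List.mem_erase_of_ne hmM |>.2 hmmem
      have h2 : PySem.List.remove? ((x :: t).erase M) m = some (((x :: t).erase M).erase m) :=
        PySem.List.remove?_eq_some_erase _ _ hm1
      set l2 := ((x :: t).erase M).erase m with hl2
      have hlen1 : ((x :: t).erase M).length = (x :: t).length - 1 := List.length_erase_of_mem hMmem
      have hlenl2 : l2.length = (x :: t).length - 2 := by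
        rw [hl2, List.length_erase_of_mem hm1, hlen1]
        omega
      -- the sorted list: head = m, last = M, interior d
      have hsperm0 : (PySem.List.sorted (x :: t) (fun y => y) false).Perm (x :: t) :=
        PySem.List.sorted_perm _ _ _
      have hslen : (PySem.List.sorted (x :: t) (fun y => y) false).length = (x :: t).length :=
        PySem.List.length_sorted _ _ _
      have hsne : PySem.List.sorted (x :: t) (fun y => y) false ≠ [] := by
        intro h0; rw [h0] at hslen; simp only [List.length_nil, List.length_cons] at hslen; omega
      obtain ⟨h0, r, hsr⟩ := List.exists_cons_of_ne_nil hsne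
      have hsperm : (h0 :: r).Perm (x :: t) := hsr ▸ hsperm0
      have hrne : r ≠ [] := by
        intro h0'
        rw [hsr, h0'] at hslen
        simp only [List.length_cons, List.length_nil, List.length_cons] at hslen hlen2
        omega
      have hspair : (h0 :: r).Pairwise (· ≤ ·) := by
        have := PySem.List.sorted_pairwise (x :: t) (fun y => y)
        rw [hsr] at this
        simpa using this
      -- head of the sorted list is the minimum m
      have hh0 : h0 = m := by
        have hle : ∀ y ∈ (x :: t), h0 ≤ y := by
          have := PySem.List.key_head_sorted_le (x :: t) (fun y => y) hsr
          simpa using this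
        have h0mem : h0 ∈ (x :: t) := hsperm.subset (by simp)
        exact le_antisymm (hle m hmmem) (hmmin h0 h0mem)
      -- last of the sorted list is the maximum M
      have hglast : (h0 :: r).getLast (List.cons_ne_nil h0 r) = M := by
        have hmem : (h0 :: r).getLast (List.cons_ne_nil h0 r) ∈ (x :: t) :=
          hsperm.subset (List.getLast_mem _)
        have hMs : M ∈ (h0 :: r) := hsperm.symm.subset hMmem
        exact le_antisymm (hMmax _ hmem) (pvLe_getLast _ hspair M hMs)
      set d := r.dropLast with hd
      have hrsplit : r = d ++ [M] := by
        have hgr : r.getLast hrne = M := by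
          rw [List.getLast_cons hrne] at hglast
          exact hglast
        rw [hd, ← hgr, List.dropLast_concat_getLast hrne]
      have hsform : h0 :: r = m :: (d ++ [M]) := by rw [hh0, ← hrsplit]
      -- l2 is a permutation of the interior d
      have hl2perm : l2.Perm d := by
        have hpa : (x :: t).Perm (m :: (d ++ [M])) := by
          rw [← hsform]; exact hsperm.symm
        have hp1 : (x :: t).Perm (M :: m :: d) :=
          hpa.trans ((List.Perm.cons m (List.perm_append_singleton M d)).trans
            (List.Perm.swap M m d))
        have hp2 : ((x :: t).erase M).Perm (m :: d) := by
          have := hp1.erase M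
          simpa using this
        have hp3 : l2.Perm ((m :: d).erase m) := hp2.erase m
        simpa using hp3
      -- and d is sorted, so sorted l2 = d
      have hdpair : d.Pairwise (· ≤ ·) := by
        have hsub : d.Sublist (h0 :: r) := by
          rw [hd]
          exact (List.dropLast_sublist r).trans (List.sublist_cons_self h0 r)
        exact hspair.sublist hsub
      have hsortl2 : PySem.List.sorted l2 (fun y => y) false = d :=
        PySem.List.sorted_id_eq_of_perm_of_pairwise l2 d hl2perm.symm hdpair
      -- unfold one step of the loop and apply the induction hypothesis
      rw [choreLoopA_cons hM hm h1 h2]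
      have hIH := ih ((x :: t).length - 2) (by omega) l2 (by omega)
        (by simp only [List.length_cons] at hev hlenl2 ⊢; omega) (res ++ [M + m])
      refine hIH.trans ?_
      rw [hsortl2, hsr, hsform, pvOuter_concat, List.append_assoc]
      have : [M + m] ++ pvOuter d = (m + M) :: pvOuter d := by
        simp [Int.add_comm]
      rw [this]

-- ===== VERDICT (by name: the statement is the Claim_ definition above) =====
theorem chore_assignment_spec : Claim_equal_chore_assignment := by
  intro chores _ hpre
  unfold Spec_chore_assignment chore_assignment chore_assignment_alt
  simp only
  rw [pvZip_eq_outer]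
  exact (PySem.List.sorted_id_eq_sorted_id_iff_perm _ _).2
    (by simpa using pvLoop_perm chores.length chores rfl hpre [])
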